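-- pv_equiv track=rewrite | github.com/ksanderfer/cmor451-final | policy1.py | waiting_cost
-- ===== SOURCE A (Python) =====
-- def waiting_cost(dt, queues):
--     cost = 0
--     c = 3  # cost coefficient for each queue type
--     assert len(queues) == 3
--     for queue in queues:
--         cost += dt * len(queue) * c
--         c -= 1
--     return cost
-- ===== SOURCE B (Python) =====
-- def waiting_cost(dt, queues):
--     assert len(queues) == 3
--     def total(qs):
--         # items remaining now, plus the cost of the earlier stages
--         if not qs:
--             return 0
--         return sum(len(q) for q in qs) + total(qs[:-1])
--     return dt * total(queues)
-- ===== Notes on version B (the rewrite author's own statement) =====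
-- stated objective: alternative
-- what changed: Drops the decrementing coefficient entirely: a recursion counts every item present once per prefix stage (total(qs) = items in qs + total(qs[:-1])), so the weight of each queue emerges from repeated counting; the result is dt times that total.
import Mathlib
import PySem

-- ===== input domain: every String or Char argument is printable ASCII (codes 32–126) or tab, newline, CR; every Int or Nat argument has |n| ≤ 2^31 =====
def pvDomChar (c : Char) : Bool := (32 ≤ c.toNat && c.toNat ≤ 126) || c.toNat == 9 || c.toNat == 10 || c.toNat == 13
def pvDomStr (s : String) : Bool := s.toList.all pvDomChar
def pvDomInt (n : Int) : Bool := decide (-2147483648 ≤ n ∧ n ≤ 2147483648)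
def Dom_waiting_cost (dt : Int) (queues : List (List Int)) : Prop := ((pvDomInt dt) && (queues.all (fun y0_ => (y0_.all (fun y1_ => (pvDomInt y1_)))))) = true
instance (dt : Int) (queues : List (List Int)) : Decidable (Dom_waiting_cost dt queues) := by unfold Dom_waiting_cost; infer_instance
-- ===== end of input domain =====

-- B replaces A's coefficient loop by a recursion that counts every item once per prefix stage (alternative decomposition).

-- ===== PORT A =====
-- A's loop: fold over queues carrying (cost, c); cost += dt*len(queue)*c; c -= 1.
def waiting_cost (dt : Int) (queues : List (List Int)) : Int :=
  (queues.foldl (fun (st : Int × Int) queue => (st.1 + dt * (queue.length : Int) * st.2, st.2 - 1)) (0, 3)).1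

-- ===== PORT B =====
-- total(qs) = items currently in qs + total(qs[:-1])  (Source B's recursive helper)
def wcTotal (qs : List (List Int)) : Int :=
  if qs = [] then 0
  else (qs.map (fun q => (q.length : Int))).sum + wcTotal qs.dropLast
termination_by qs.length
decreasing_by
  rename_i h
  cases qs with
  | nil => exact absurd rfl h
  | cons x xs => simp [List.length_dropLast]

def waiting_cost_alt (dt : Int) (queues : List (List Int)) : Int :=
  dt * wcTotal queues

-- ===== PRECONDITION & SPEC =====
-- A's 'assert len(queues) == 3' raises AssertionError for any other length; Pre_ admits exactly length-3 inputs.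
def Pre_waiting_cost (dt : Int) (queues : List (List Int)) : Prop := queues.length = 3
instance (dt : Int) (queues : List (List Int)) : Decidable (Pre_waiting_cost dt queues) := by unfold Pre_waiting_cost; infer_instance
def pvWitness_waiting_cost : Int × List (List Int) := (2, [[1], [], [5, 6]])

def Spec_waiting_cost (dt : Int) (queues : List (List Int)) (out : Int) : Prop := out = waiting_cost_alt dt queues
instance (dt : Int) (queues : List (List Int)) (out : Int) : Decidable (Spec_waiting_cost dt queues out) := by unfold Spec_waiting_cost; infer_instance

-- ===== CLAIM =====
def Claim_equal_waiting_cost : Prop := ∀ (dt : Int) (queues : List (List Int)), Dom_waiting_cost dt queues → Pre_waiting_cost dt queues → Spec_waiting_cost dt queues (waiting_cost dt queues)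

-- ===== LEMMAS AND PROOFS =====

-- ===== VERDICT =====
theorem waiting_cost_spec : Claim_equal_waiting_cost := by
  intro dt queues _ hpre
  match queues, hpre with
  | [a, b, c], _ =>
    unfold Spec_waiting_cost waiting_cost waiting_cost_alt
    rw [wcTotal.eq_def]
    simp only [List.dropLast, reduceCtorEq, if_false]
    rw [wcTotal.eq_def]
    simp only [List.dropLast, reduceCtorEq, if_false]
    rw [wcTotal.eq_def]
    simp only [List.dropLast, reduceCtorEq, if_false]
    rw [wcTotal.eq_def]
    simp [List.foldl]
    ring
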